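-- pv_equiv track=rewrite | github.com/Melodiz/dailycode | HSE/ADS_contests/graphs_1/dfs.py | dfs
-- ===== SOURCE A (Python) =====
-- def dfs(start, connectivity):
--     visited = [False] * len(connectivity)
--     stack = [start]
--     while stack:
--         vertex = stack.pop()
--         if not visited[vertex]:
--             visited[vertex] = True
--             for neighbor in range(len(connectivity)):
--                 if connectivity[vertex][neighbor] == 1 and not visited[neighbor]:
--                     stack.append(neighbor)
--     return visited
-- ===== SOURCE B (Python) =====
-- def dfs(start, connectivity):
--     # BFS over the adjacency matrix: FIFO worklist scanned with a head index,
--     # vertices are marked when enqueued instead of when popped.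
--     n = len(connectivity)
--     visited = [False] * n
--     visited[start] = True
--     queue = [start]
--     head = 0
--     while head < len(queue):
--         u = queue[head]
--         head += 1
--         for v in range(n):
--             if connectivity[u][v] == 1 and not visited[v]:
--                 visited[v] = True
--                 queue.append(v)
--     return visited
-- ===== Notes on version B (the rewrite author's own statement) =====
-- stated objective: alternative
-- what changed: Replaces the LIFO stack DFS that marks vertices when popped with a FIFO breadth-first traversal over a head-indexed queue that marks vertices when enqueued, so each vertex enters the worklist at most once.
-- outside the precondition, e.g. on dfs(0, [[1, 0], [0]]): A returns [True, False], B returns [True, False]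
import Mathlib
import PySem

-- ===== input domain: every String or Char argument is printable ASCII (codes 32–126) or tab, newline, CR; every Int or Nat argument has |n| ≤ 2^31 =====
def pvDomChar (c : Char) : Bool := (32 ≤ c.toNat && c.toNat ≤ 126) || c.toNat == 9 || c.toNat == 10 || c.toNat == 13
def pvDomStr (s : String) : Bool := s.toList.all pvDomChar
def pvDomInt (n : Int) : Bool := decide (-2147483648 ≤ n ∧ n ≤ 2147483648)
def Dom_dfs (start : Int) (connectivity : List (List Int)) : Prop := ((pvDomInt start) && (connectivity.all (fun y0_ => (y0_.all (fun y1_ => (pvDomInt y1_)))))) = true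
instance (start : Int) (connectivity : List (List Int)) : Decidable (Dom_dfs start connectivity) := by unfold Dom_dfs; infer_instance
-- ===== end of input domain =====

-- B replaces A's LIFO stack DFS (mark on pop) with a FIFO breadth-first traversal
-- (head-indexed queue, mark on enqueue): a genuinely different worklist discipline
-- of the same O(V^2) cost; equal final visited vector, proved via reachability.

-- ===== PORT A =====

-- helper used by the termination argument of both loops: setting a False cell True
-- shrinks the number of False cells.
theorem pvCount_set (vis : List Bool) : ∀ (k : Nat), k < vis.length → vis[k]? = some false →
    (vis.set k true).count false + 1 = vis.count false := by
  induction vis with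
  | nil => intro k h; simp at h
  | cons b bs ih =>
    intro k hk hb
    cases k with
    | zero => simp_all
    | succ k =>
      have := ih k (by simpa using hk) (by simpa using hb)
      simp only [List.set_cons_succ, List.count_cons]
      omega

theorem pvCount_pySetD_lt (vis : List Bool) (i : Int)
    (h : PySem.List.pyGet? vis i = some false) :
    (PySem.List.pySetD vis i true).count false < vis.count false := by
  simp only [PySem.List.pyGet?, PySem.List.pySetD, PySem.List.pySet?] at *
  cases hk : PySem.List.pyIdx? vis.length i with
  | none => simp [hk] at h
  | some k =>
    simp only [hk, Option.bind_some, Option.map_some, Option.getD_some] at *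
    have hlt : k < vis.length := by
      by_contra hge
      simp [List.getElem?_eq_none (by omega : vis.length ≤ k)] at h
    have := pvCount_set vis k hlt h
    omega

-- the push loop of A appends exactly the neighbours passing the test (cites the
-- library loop-shape lemma)
theorem pvFoldPush_eq (p : Int → Bool) (L acc : List Int) :
    L.foldl (fun st j => if p j then st ++ [j] else st) acc = acc ++ L.filter p := by
  simpa using PySem.List.foldl_append_if p id L acc

-- the inner 'for neighbor in range(len(connectivity))' push loop of A, as a named helper
def dfsPushes (conn : List (List Int)) (vertex : Int) (vis' : List Bool)
    (rest : List Int) : List Int :=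
  (PySem.List.pyRange 0 (conn.length : Int) 1).foldl
    (fun st j =>
      if PySem.List.pyGetD (PySem.List.pyGetD conn vertex []) j 0 == 1
          && !(PySem.List.pyGetD vis' j false)
      then st ++ [j] else st) rest

theorem pvPushes_len (conn : List (List Int)) (vertex : Int) (vis' : List Bool)
    (rest : List Int) :
    (dfsPushes conn vertex vis' rest).length ≤ rest.length + conn.length := by
  unfold dfsPushes
  rw [pvFoldPush_eq]
  have h1 := List.length_filter_le
    (fun j => PySem.List.pyGetD (PySem.List.pyGetD conn vertex []) j 0 == 1
      && !(PySem.List.pyGetD vis' j false))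
    (PySem.List.pyRange 0 (conn.length : Int) 1)
  have h2 : (PySem.List.pyRange 0 (conn.length : Int) 1).length = conn.length := by
    rw [PySem.List.length_pyRange_one]; omega
  simp only [List.length_append]
  omega

theorem pvMeasA (c c' L r s x : Nat) (h1 : r + 1 = s) (h2 : c' < c) (h3 : x ≤ r + L) :
    c' * (L + 1) + x < c * (L + 1) + s := by
  have h4 := Nat.mul_le_mul_right (L + 1) (show c' + 1 ≤ c by omega)
  have h5 : (c' + 1) * (L + 1) = c' * (L + 1) + (L + 1) := by ring
  omega

theorem pvMeasB (a b c r : Nat) (h : a + b ≤ c) : a + (r + b) < c + (r + 1) := by omega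

-- A, transliterated: while-loop over an explicit stack, popping from the end,
-- marking on pop, pushing every unvisited out-neighbour.
def dfsLoop (conn : List (List Int)) (vis : List Bool) (stack : List Int) : List Bool :=
  match hp : PySem.List.pop? stack (-1) with
  | none => vis                       -- while stack: loop ends
  | some (vertex, rest) =>
    match hg : PySem.List.pyGet? vis vertex with
    | none => vis                     -- IndexError (outside Pre_)
    | some b =>
      if hb : b then dfsLoop conn vis rest
      else
        let vis' := PySem.List.pySetD vis vertex true
        dfsLoop conn vis' (dfsPushes conn vertex vis' rest)
termination_by vis.count false * (conn.length + 1) + stack.length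
decreasing_by
  · have h1 : rest.length + 1 = stack.length := by
      simpa using PySem.List.length_of_pop?_eq_some stack hp
    omega
  · exact pvMeasA (vis.count false) ((PySem.List.pySetD vis vertex true).count false)
      conn.length rest.length stack.length _
      (by simpa using PySem.List.length_of_pop?_eq_some stack hp)
      (pvCount_pySetD_lt vis vertex
        (by rw [Bool.not_eq_true] at hb; rw [← hb]; exact hg))
      (pvPushes_len conn vertex (PySem.List.pySetD vis vertex true) rest)

def dfs (start : Int) (connectivity : List (List Int)) : List Bool :=
  dfsLoop connectivity (List.replicate connectivity.length false) [start]

-- ===== PORT B =====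

-- one iteration of B's inner 'for v in range(n)': mark-and-enqueue unvisited neighbours
def bfsStep (conn : List (List Int)) (u : Int) (p : List Bool × List Int) (j : Int) :
    List Bool × List Int :=
  if PySem.List.pyGetD (PySem.List.pyGetD conn u []) j 0 == 1 then
    match PySem.List.pyGet? p.1 j with
    | none => p                       -- IndexError (outside Pre_)
    | some b => if b then p else (PySem.List.pySetD p.1 j true, p.2 ++ [j])
  else p

theorem pvBfsStep_bound (conn : List (List Int)) (u : Int) (p : List Bool × List Int)
    (j : Int) : (bfsStep conn u p j).1.count false + (bfsStep conn u p j).2.length ≤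
      p.1.count false + p.2.length := by
  unfold bfsStep
  split
  · cases hg : PySem.List.pyGet? p.1 j with
    | none => simp
    | some b =>
      cases b with
      | true => simp
      | false =>
        have := pvCount_pySetD_lt p.1 j hg
        simp only [Bool.false_eq_true, if_false, List.length_append, List.length_cons,
          List.length_nil]
        omega
  · simp

theorem pvBfsFold_bound (conn : List (List Int)) (u : Int) :
    ∀ (L : List Int) (p : List Bool × List Int),
      (L.foldl (bfsStep conn u) p).1.count false + (L.foldl (bfsStep conn u) p).2.length ≤
        p.1.count false + p.2.length := by
  intro L
  induction L with
  | nil => intro p; simp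
  | cons j L ih =>
    intro p
    calc _ ≤ (bfsStep conn u p j).1.count false + (bfsStep conn u p j).2.length :=
          ih (bfsStep conn u p j)
      _ ≤ _ := pvBfsStep_bound conn u p j

-- B, transliterated: the queue with the head pointer is represented by its
-- unprocessed suffix; appends of the inner for-loop land after it.
def bfsLoop (conn : List (List Int)) (vis : List Bool) (queue : List Int) : List Bool :=
  match queue with
  | [] => vis                         -- head has caught up with len(queue)
  | u :: rest =>
    let p := (PySem.List.pyRange 0 (conn.length : Int) 1).foldl (bfsStep conn u) (vis, [])
    bfsLoop conn p.1 (rest ++ p.2)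
termination_by vis.count false + queue.length
decreasing_by
  simp only [List.length_append, List.length_cons]
  exact pvMeasB _ _ _ _
    (by simpa using pvBfsFold_bound conn u (PySem.List.pyRange 0 (conn.length : Int) 1) (vis, []))

def dfs_alt (start : Int) (connectivity : List (List Int)) : List Bool :=
  let visited := PySem.List.pySetD (List.replicate connectivity.length false) start true
  bfsLoop connectivity visited [start]

-- ===== PRECONDITION & SPEC =====
-- Pre_ excludes inputs where the Python A raises an IndexError: a start index out of
-- range for the vertex list, and matrices with a row shorter than the vertex count
-- (whether a short row actually raises depends on reachability, which is not a
-- closed-form condition on the input, so all such ragged matrices are excluded).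
def Pre_dfs (start : Int) (connectivity : List (List Int)) : Prop :=
  PySem.Raise.InRange connectivity.length start ∧
    ∀ row ∈ connectivity, connectivity.length ≤ row.length
instance (start : Int) (connectivity : List (List Int)) : Decidable (Pre_dfs start connectivity) := by
  unfold Pre_dfs; infer_instance

def pvWitness_dfs : Int × List (List Int) := (0, [[0]])

def Spec_dfs (start : Int) (connectivity : List (List Int)) (out : List Bool) : Prop :=
  out = dfs_alt start connectivity
instance (start : Int) (connectivity : List (List Int)) (out : List Bool) : Decidable (Spec_dfs start connectivity out) := by unfold Spec_dfs; infer_instance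

-- ===== CLAIM (what is proved, stated in full; the proofs are below) =====
def Claim_equal_dfs : Prop := ∀ (start : Int) (connectivity : List (List Int)), Dom_dfs start connectivity → Pre_dfs start connectivity → Spec_dfs start connectivity (dfs start connectivity)

-- ===== LEMMAS AND PROOFS =====

-- Python's index normalisation for an in-range (possibly negative) index
def pvWrap (len : Nat) (i : Int) : Nat := if 0 ≤ i then i.toNat else len - (-i).toNat

theorem pvIdx_eq {len : Nat} {i : Int} (h : PySem.Raise.InRange len i) :
    PySem.List.pyIdx? len i = some (pvWrap len i) := by
  obtain ⟨h1, h2⟩ := h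
  unfold PySem.List.pyIdx? pvWrap
  split_ifs <;> simp_all

theorem pvWrap_lt {len : Nat} {i : Int} (h : PySem.Raise.InRange len i) :
    pvWrap len i < len := by
  obtain ⟨h1, h2⟩ := h
  unfold pvWrap
  split_ifs <;> omega

theorem pvGet_wrap {α : Type} (xs : List α) (i : Int) (h : PySem.Raise.InRange xs.length i) :
    PySem.List.pyGet? xs i = xs[pvWrap xs.length i]? := by
  simp [PySem.List.pyGet?, pvIdx_eq h]

theorem pvGetD_wrap {α : Type} (xs : List α) (i : Int) (d : α)
    (h : PySem.Raise.InRange xs.length i) :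
    PySem.List.pyGetD xs i d = xs.getD (pvWrap xs.length i) d := by
  simp [PySem.List.pyGetD, pvGet_wrap xs i h, List.getD_eq_getElem?_getD]

theorem pvSet_wrap {α : Type} (xs : List α) (i : Int) (v : α)
    (h : PySem.Raise.InRange xs.length i) :
    PySem.List.pySetD xs i v = xs.set (pvWrap xs.length i) v := by
  simp [PySem.List.pySetD, PySem.List.pySet?, pvIdx_eq h]

theorem pvGetD_set (vis : List Bool) (w k : Nat) (hw : w < vis.length) :
    (vis.set w true).getD k false = if k = w then true else vis.getD k false := by
  simp only [List.getD_eq_getElem?_getD, List.getElem?_set]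
  by_cases h : k = w <;> simp [h, hw, Ne.symm]

theorem pvGetD_replicate (n k : Nat) : (List.replicate n false).getD k false = false := by
  simp only [List.getD_eq_getElem?_getD, List.getElem?_replicate]
  split <;> simp

-- the edge relation both programs explore: entry (u,v) of the matrix equals 1
def pvStep (conn : List (List Int)) (u v : Nat) : Prop :=
  v < conn.length ∧ (conn.getD u []).getD v 0 = 1

def pvReach (conn : List (List Int)) (s k : Nat) : Prop :=
  Relation.ReflTransGen (pvStep conn) s k

theorem pvPop_eq {α : Type} (xs rest : List α) (v : α)
    (h : PySem.List.pop? xs (-1) = some (v, rest)) : xs = rest ++ [v] := by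
  induction xs using List.reverseRecOn with
  | nil => simp [PySem.List.pop?] at h
  | append_singleton ys y _ =>
    rw [PySem.List.pop?_last] at h
    obtain ⟨h1, h2⟩ := Prod.mk.injEq .. ▸ (Option.some.injEq .. ▸ h)
    subst h1; subst h2; rfl

theorem pvPop_none {α : Type} (xs : List α) (h : PySem.List.pop? xs (-1) = none) :
    xs = [] := by
  induction xs using List.reverseRecOn with
  | nil => rfl
  | append_singleton ys y _ => rw [PySem.List.pop?_last] at h; cases h

theorem pvRangeCast (n : Nat) (a : Int) (ha : 0 ≤ a) :
    ∀ i ∈ PySem.List.pyRange a (n : Int) 1, ∃ m : Nat, m < n ∧ i = (m : Int) := by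
  intro i hi
  rw [PySem.List.mem_pyRange_one] at hi
  exact ⟨i.toNat, by omega, by omega⟩

theorem dfsLoop_eq_none (conn : List (List Int)) (vis : List Bool) (stack : List Int)
    (hp : PySem.List.pop? stack (-1) = none) : dfsLoop conn vis stack = vis := by
  rw [dfsLoop]
  split
  next => rfl
  next vtx rst hp2 => rw [hp2] at hp; cases hp

theorem dfsLoop_eq_true (conn : List (List Int)) (vis : List Bool) (stack : List Int)
    (vertex : Int) (rest : List Int)
    (hp : PySem.List.pop? stack (-1) = some (vertex, rest))
    (hg : PySem.List.pyGet? vis vertex = some true) :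
    dfsLoop conn vis stack = dfsLoop conn vis rest := by
  rw [dfsLoop]
  split
  next hp2 => rw [hp2] at hp; cases hp
  next vtx rst hp2 =>
    rw [hp2] at hp
    have hpi := Option.some.inj hp
    obtain rfl : vtx = vertex := congrArg Prod.fst hpi
    obtain rfl : rst = rest := congrArg Prod.snd hpi
    split
    next hg2 => rw [hg2] at hg; cases hg
    next b hg2 =>
      rw [hg2] at hg
      obtain rfl : b = true := Option.some.inj hg
      simp

theorem dfsLoop_eq_false (conn : List (List Int)) (vis : List Bool) (stack : List Int)
    (vertex : Int) (rest : List Int)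
    (hp : PySem.List.pop? stack (-1) = some (vertex, rest))
    (hg : PySem.List.pyGet? vis vertex = some false) :
    dfsLoop conn vis stack = dfsLoop conn (PySem.List.pySetD vis vertex true)
      (dfsPushes conn vertex (PySem.List.pySetD vis vertex true) rest) := by
  rw [dfsLoop]
  split
  next hp2 => rw [hp2] at hp; cases hp
  next vtx rst hp2 =>
    rw [hp2] at hp
    have hpi := Option.some.inj hp
    obtain rfl : vtx = vertex := congrArg Prod.fst hpi
    obtain rfl : rst = rest := congrArg Prod.snd hpi
    split
    next hg2 => rw [hg2] at hg; cases hg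
    next b hg2 =>
      rw [hg2] at hg
      obtain rfl : b = false := Option.some.inj hg
      simp

theorem bfsLoop_eq_cons (conn : List (List Int)) (vis : List Bool) (u : Int)
    (rest : List Int) :
    bfsLoop conn vis (u :: rest) =
      bfsLoop conn
        (List.foldl (bfsStep conn u) (vis, []) (PySem.List.pyRange 0 (conn.length : Int) 1)).1
        (rest ++ (List.foldl (bfsStep conn u) (vis, [])
          (PySem.List.pyRange 0 (conn.length : Int) 1)).2) := by
  rw [bfsLoop]

theorem dfsLoop_main (conn : List (List Int)) (s : Nat) :
    ∀ (vis : List Bool) (stack : List Int), vis.length = conn.length →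
    (∀ i ∈ stack, ∃ k : Nat, k < conn.length ∧ i = (k : Int)) →
    (∀ k : Nat, (k : Int) ∈ stack → pvReach conn s k) →
    (∀ k, vis.getD k false = true → pvReach conn s k) →
    (∀ k, vis.getD k false = true → ∀ m, pvStep conn k m →
        vis.getD m false = true ∨ (m : Int) ∈ stack) →
    ((dfsLoop conn vis stack).length = conn.length
    ∧ (∀ k, vis.getD k false = true → (dfsLoop conn vis stack).getD k false = true)
    ∧ (∀ k, (dfsLoop conn vis stack).getD k false = true → pvReach conn s k)
    ∧ (∀ k : Nat, (k : Int) ∈ stack → (dfsLoop conn vis stack).getD k false = true)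
    ∧ (∀ k, (dfsLoop conn vis stack).getD k false = true → ∀ m, pvStep conn k m →
        (dfsLoop conn vis stack).getD m false = true)) := by
  intro vis stack
  induction vis, stack using dfsLoop.induct conn with
  | case1 vis stack hp =>
    intro hlen hcast hreach hmark hpend
    obtain rfl : stack = [] := pvPop_none stack hp
    rw [dfsLoop_eq_none conn vis [] hp]
    refine ⟨hlen, fun k hk => hk, hmark, by simp, ?_⟩
    intro k hk m hm
    rcases hpend k hk m hm with h | h
    · exact h
    · simp at h
  | case2 vis stack vertex rest hp hg =>
    intro hlen hcast _ _ _
    exfalso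
    have hmem : vertex ∈ stack := by rw [pvPop_eq stack rest vertex hp]; simp
    obtain ⟨u, hu, rfl⟩ := hcast vertex hmem
    rw [PySem.List.pyGet?_natCast, List.getElem?_eq_getElem (by omega)] at hg
    simp at hg
  | case3 vis stack vertex rest hp hg ih =>
    intro hlen hcast hreach hmark hpend
    have hstk : stack = rest ++ [vertex] := pvPop_eq stack rest vertex hp
    have hE : dfsLoop conn vis stack = dfsLoop conn vis rest :=
      dfsLoop_eq_true conn vis stack vertex rest hp hg
    obtain ⟨u, hu, rfl⟩ := hcast vertex (by rw [hstk]; simp)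
    have hvu : vis.getD u false = true := by
      rw [PySem.List.pyGet?_natCast, List.getElem?_eq_getElem (by omega)] at hg
      have h' := Option.some.inj hg
      rw [List.getD_eq_getElem?_getD, List.getElem?_eq_getElem (show u < vis.length by omega)]
      simpa using h'
    have hsub : ∀ i, i ∈ rest → i ∈ stack := by intro i hi; rw [hstk]; simp [hi]
    have hpend' : ∀ k, vis.getD k false = true → ∀ m, pvStep conn k m →
        vis.getD m false = true ∨ (m : Int) ∈ rest := by
      intro k hk m hm
      rcases hpend k hk m hm with h | h
      · exact Or.inl h
      · rw [hstk] at h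
        rcases List.mem_append.mp h with h' | h'
        · exact Or.inr h'
        · simp at h'
          obtain rfl : m = u := by exact_mod_cast h'
          exact Or.inl hvu
    obtain ⟨c1, c2, c3, c4, c5⟩ := ih hlen (fun i hi => hcast i (hsub i hi))
      (fun k hk => hreach k (hsub _ hk)) hmark hpend'
    rw [hE]
    refine ⟨c1, c2, c3, ?_, c5⟩
    intro k hk
    rw [hstk] at hk
    rcases List.mem_append.mp hk with h | h
    · exact c4 k h
    · simp at h
      obtain rfl : k = u := by exact_mod_cast h
      exact c2 k hvu
  | case4 vis stack vertex rest hp b hg hb visP ih =>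
    intro hlen hcast hreach hmark hpend
    obtain rfl : b = false := by simpa using hb
    have hstk : stack = rest ++ [vertex] := pvPop_eq stack rest vertex hp
    obtain ⟨u, hu, rfl⟩ := hcast vertex (by rw [hstk]; simp)
    have hulen : u < vis.length := by omega
    have hvu : vis.getD u false = false := by
      rw [PySem.List.pyGet?_natCast, List.getElem?_eq_getElem (by omega)] at hg
      have h' := Option.some.inj hg
      rw [List.getD_eq_getElem?_getD, List.getElem?_eq_getElem hulen]
      simpa using h'
    have hset : PySem.List.pySetD vis ((u : Nat) : Int) true = vis.set u true :=
      PySem.List.pySetD_natCast vis u true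
    have hvisP : visP = vis.set u true := hset
    rw [hvisP] at ih
    set P : Int → Bool := fun j =>
      PySem.List.pyGetD (PySem.List.pyGetD conn ((u : Nat) : Int) []) j 0 == 1
        && !PySem.List.pyGetD (vis.set u true) j false with hP
    have hnst : dfsPushes conn ((u : Nat) : Int) (vis.set u true) rest
        = rest ++ (PySem.List.pyRange 0 (conn.length : Int) 1).filter P := by
      unfold dfsPushes
      exact pvFoldPush_eq P (PySem.List.pyRange 0 (conn.length : Int) 1) rest
    rw [hnst] at ih
    have hE : dfsLoop conn vis stack = dfsLoop conn (vis.set u true)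
        (rest ++ (PySem.List.pyRange 0 (conn.length : Int) 1).filter P) := by
      rw [dfsLoop_eq_false conn vis stack ((u : Nat) : Int) rest hp hg]
      rw [hset, hnst]
    have hPchar : ∀ m : Nat, P ((m : Int)) = true ↔
        ((conn.getD u []).getD m 0 = 1 ∧ (vis.set u true).getD m false = false) := by
      intro m
      rw [hP]
      simp
    have hgset : ∀ k, (vis.set u true).getD k false =
        if k = u then true else vis.getD k false := fun k => pvGetD_set vis u k hulen
    have hreachu : pvReach conn s u := hreach u (by rw [hstk]; simp)
    have hmemf : ∀ i, i ∈ (PySem.List.pyRange 0 (conn.length : Int) 1).filter P ↔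
        (i ∈ PySem.List.pyRange 0 (conn.length : Int) 1 ∧ P i = true) := by
      intro i; exact List.mem_filter
    have hcast' : ∀ i ∈ rest ++ (PySem.List.pyRange 0 (conn.length : Int) 1).filter P,
        ∃ k : Nat, k < conn.length ∧ i = (k : Int) := by
      intro i hi
      rcases List.mem_append.mp hi with h | h
      · exact hcast i (by rw [hstk]; simp [h])
      · exact pvRangeCast conn.length 0 le_rfl i ((hmemf i).mp h).1
    have hreach' : ∀ k : Nat, (k : Int) ∈ rest ++
        (PySem.List.pyRange 0 (conn.length : Int) 1).filter P → pvReach conn s k := by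
      intro k hk
      rcases List.mem_append.mp hk with h | h
      · exact hreach k (by rw [hstk]; simp [h])
      · obtain ⟨hr, hpk⟩ := (hmemf _).mp h
        have hkn : k < conn.length := by
          rw [PySem.List.mem_pyRange_one] at hr; omega
        exact Relation.ReflTransGen.tail hreachu ⟨hkn, ((hPchar k).mp hpk).1⟩
    have hmark' : ∀ k, (vis.set u true).getD k false = true → pvReach conn s k := by
      intro k hk
      rw [hgset] at hk
      by_cases hku : k = u
      · subst hku; exact hreachu
      · rw [if_neg hku] at hk; exact hmark k hk
    have hpend' : ∀ k, (vis.set u true).getD k false = true → ∀ m, pvStep conn k m →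
        (vis.set u true).getD m false = true ∨ (m : Int) ∈ rest ++
          (PySem.List.pyRange 0 (conn.length : Int) 1).filter P := by
      intro k hk m hm
      by_cases hmu : (vis.set u true).getD m false = true
      · exact Or.inl hmu
      · right
        rw [hgset] at hk
        by_cases hku : k = u
        · rw [List.mem_append, hmemf]
          right
          constructor
          · rw [PySem.List.mem_pyRange_one]; exact ⟨by omega, by exact_mod_cast hm.1⟩
          · rw [hPchar]
            exact ⟨hku ▸ hm.2, by simpa using hmu⟩
        · rw [if_neg hku] at hk
          rcases hpend k hk m hm with h | h
          · refine absurd ?_ hmu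
            rw [hgset]
            split
            · rfl
            · exact h
          · rw [hstk] at h
            rcases List.mem_append.mp h with h' | h'
            · exact List.mem_append.mpr (Or.inl h')
            · exfalso
              simp at h'
              obtain rfl : m = u := by exact_mod_cast h'
              rw [hgset] at hmu; simp at hmu
    obtain ⟨c1, c2, c3, c4, c5⟩ := ih (by simpa using hlen) hcast' hreach' hmark' hpend'
    rw [hE]
    refine ⟨c1, ?_, c3, ?_, c5⟩
    · intro k hk
      apply c2
      rw [hgset]
      split
      · rfl
      · exact hk
    · intro k hk
      rw [hstk] at hk
      rcases List.mem_append.mp hk with h | h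
      · exact c4 k (List.mem_append.mpr (Or.inl h))
      · simp at h
        obtain rfl : k = u := by exact_mod_cast h
        exact c2 _ (by rw [hgset]; simp)

theorem bfsFold_main (conn : List (List Int)) (u' : Nat) :
    ∀ (L : List Int) (p : List Bool × List Int),
    (∀ i ∈ L, ∃ m : Nat, m < conn.length ∧ i = (m : Int)) →
    p.1.length = conn.length →
    (((L.foldl (bfsStep conn ((u' : Nat) : Int)) p).1.length = conn.length)
    ∧ (∀ k, p.1.getD k false = true →
        (L.foldl (bfsStep conn ((u' : Nat) : Int)) p).1.getD k false = true)
    ∧ (∀ k, (L.foldl (bfsStep conn ((u' : Nat) : Int)) p).1.getD k false = true →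
        p.1.getD k false = true ∨
          (pvStep conn u' k ∧ (k : Int) ∈ (L.foldl (bfsStep conn ((u' : Nat) : Int)) p).2))
    ∧ (∀ i ∈ (L.foldl (bfsStep conn ((u' : Nat) : Int)) p).2, i ∈ p.2 ∨ ∃ m : Nat,
        i = (m : Int) ∧
        (L.foldl (bfsStep conn ((u' : Nat) : Int)) p).1.getD m false = true ∧ pvStep conn u' m)
    ∧ (∀ i ∈ p.2, i ∈ (L.foldl (bfsStep conn ((u' : Nat) : Int)) p).2)) := by
  intro L
  induction L with
  | nil =>
    intro p _ hlen
    exact ⟨hlen, fun k hk => hk, fun k hk => Or.inl hk, fun i hi => Or.inl hi, fun i hi => hi⟩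
  | cons j L ihL =>
    intro p HL hlen
    obtain ⟨m, hmn, rfl⟩ := HL j (by simp)
    have HL' : ∀ i ∈ L, ∃ m : Nat, m < conn.length ∧ i = (m : Int) := by
      intro i hi; exact HL i (by simp [hi])
    -- characterise the single step
    have hget : PySem.List.pyGet? p.1 ((m : Int)) = some (p.1.getD m false) := by
      rw [PySem.List.pyGet?_natCast, List.getElem?_eq_getElem (by omega)]
      simp [List.getD_eq_getElem?_getD, List.getElem?_eq_getElem (show m < p.1.length by omega)]
    have hstep : bfsStep conn ((u' : Nat) : Int) p ((m : Int)) = p ∨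
        (p.1.getD m false = false ∧ pvStep conn u' m ∧
          bfsStep conn ((u' : Nat) : Int) p ((m : Int)) = (p.1.set m true, p.2 ++ [(m : Int)])) := by
      unfold bfsStep
      by_cases hc : PySem.List.pyGetD (PySem.List.pyGetD conn ((u' : Nat) : Int) []) ((m : Int)) 0 == 1
      · rw [if_pos hc, hget]
        by_cases hv : p.1.getD m false
        · left; rw [hv]; simp
        · right
          rw [Bool.not_eq_true] at hv
          refine ⟨hv, ⟨hmn, ?_⟩, by rw [hv]; simp [PySem.List.pySetD_natCast]⟩
          simpa using hc
      · left; rw [if_neg hc]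
    rcases hstep with hq | ⟨hvm, hsm, hq⟩
    · have := ihL p HL' hlen
      simpa [List.foldl_cons, hq] using this
    · have hlen' : (p.1.set m true, p.2 ++ [(m : Int)]).1.length = conn.length := by
        simpa using hlen
      obtain ⟨c1, c2, c3, c4, c5⟩ := ihL (p.1.set m true, p.2 ++ [(m : Int)]) HL' hlen'
      have hgset : ∀ k, (p.1.set m true).getD k false =
          if k = m then true else p.1.getD k false :=
        fun k => pvGetD_set p.1 m k (by omega)
      rw [List.foldl_cons, hq]
      refine ⟨c1, ?_, ?_, ?_, ?_⟩
      · intro k hk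
        refine c2 k ?_
        rw [hgset]
        split
        · rfl
        · exact hk
      · intro k hk
        rcases c3 k hk with h | ⟨h1, h2⟩
        · rw [hgset] at h
          by_cases hkm : k = m
          · subst hkm
            right
            refine ⟨hsm, ?_⟩
            exact c5 ((k : Int)) (by simp)
          · rw [if_neg hkm] at h; exact Or.inl h
        · exact Or.inr ⟨h1, h2⟩
      · intro i hi
        rcases c4 i hi with h | h
        · rcases List.mem_append.mp h with h' | h'
          · exact Or.inl h'
          · simp at h'
            subst h'
            right
            exact ⟨m, rfl, c2 m (by rw [hgset]; simp), hsm⟩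
        · exact Or.inr h
      · intro i hi
        exact c5 i (by simp [hi])

theorem bfsFold_closes (conn : List (List Int)) (u' : Nat) (vis : List Bool)
    (hlen : vis.length = conn.length) (m : Nat) (hm : pvStep conn u' m) :
    ((PySem.List.pyRange 0 (conn.length : Int) 1).foldl (bfsStep conn ((u' : Nat) : Int))
      (vis, [])).1.getD m false = true := by
  obtain ⟨hmn, hedge⟩ := hm
  have hsplit : PySem.List.pyRange 0 (conn.length : Int) 1 =
      PySem.List.pyRange 0 (m : Int) 1 ++
        ((m : Int) :: PySem.List.pyRange ((m : Int) + 1) (conn.length : Int) 1) := by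
    rw [PySem.List.pyRange_one_append 0 ((m : Int)) ((conn.length : Int)) (by omega)
      (by exact_mod_cast Nat.le_of_lt hmn)]
    congr 1
    exact PySem.List.pyRange_one_cons (by exact_mod_cast hmn)
  rw [hsplit, List.foldl_append, List.foldl_cons]
  set p1 := (PySem.List.pyRange 0 (m : Int) 1).foldl (bfsStep conn ((u' : Nat) : Int)) (vis, [])
  have hp1len : p1.1.length = conn.length := by
    have := bfsFold_main conn u' (PySem.List.pyRange 0 (m : Int) 1) (vis, [])
      (fun i hi => by
        rw [PySem.List.mem_pyRange_one] at hi
        exact ⟨i.toNat, by omega, by omega⟩) hlen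
    exact this.1
  -- processing index m marks m
  have hq : (bfsStep conn ((u' : Nat) : Int) p1 ((m : Int))).1.getD m false = true := by
    unfold bfsStep
    rw [if_pos (by simpa using hedge)]
    rw [PySem.List.pyGet?_natCast, List.getElem?_eq_getElem (by omega)]
    by_cases hv : p1.1.getD m false
    · have : p1.1[m] = true := by
        have := hv
        rw [List.getD_eq_getElem?_getD, List.getElem?_eq_getElem (show m < p1.1.length by omega)]
          at this
        simpa using this
      rw [this]; simpa using hv
    · rw [Bool.not_eq_true] at hv
      have : p1.1[m] = false := by
        have := hv
        rw [List.getD_eq_getElem?_getD, List.getElem?_eq_getElem (show m < p1.1.length by omega)]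
          at this
        simpa using this
      rw [this]
      simp only [Bool.false_eq_true, if_false]
      rw [PySem.List.pySetD_natCast]
      rw [pvGetD_set p1.1 m m (by omega)]
      simp
  -- the suffix fold preserves marks
  have hqlen : (bfsStep conn ((u' : Nat) : Int) p1 ((m : Int))).1.length = conn.length := by
    have := bfsFold_main conn u' [((m : Int))] p1 (fun i hi => by
      simp at hi; exact ⟨m, hmn, hi⟩) hp1len
    simpa using this.1
  have := bfsFold_main conn u' (PySem.List.pyRange ((m : Int) + 1) (conn.length : Int) 1)
    (bfsStep conn ((u' : Nat) : Int) p1 ((m : Int)))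
    (fun i hi => by
      rw [PySem.List.mem_pyRange_one] at hi
      exact ⟨i.toNat, by omega, by omega⟩) hqlen
  exact this.2.1 m hq

theorem bfsLoop_main (conn : List (List Int)) (s : Nat) :
    ∀ (vis : List Bool) (queue : List Int), vis.length = conn.length →
    (∀ i ∈ queue, ∃ k : Nat, k < conn.length ∧ i = (k : Int) ∧ vis.getD k false = true) →
    (∀ k, vis.getD k false = true → pvReach conn s k) →
    (∀ k, vis.getD k false = true →
        ((k : Int) ∈ queue ∨ ∀ m, pvStep conn k m → vis.getD m false = true)) →
    ((bfsLoop conn vis queue).length = conn.length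
    ∧ (∀ k, vis.getD k false = true → (bfsLoop conn vis queue).getD k false = true)
    ∧ (∀ k, (bfsLoop conn vis queue).getD k false = true → pvReach conn s k)
    ∧ (∀ k, (bfsLoop conn vis queue).getD k false = true → ∀ m, pvStep conn k m →
        (bfsLoop conn vis queue).getD m false = true)) := by
  intro vis queue
  induction vis, queue using bfsLoop.induct conn with
  | case1 vis =>
    intro hlen _ hmark hpend
    have hE : bfsLoop conn vis [] = vis := by rw [bfsLoop]
    rw [hE]
    refine ⟨hlen, fun k hk => hk, hmark, ?_⟩
    intro k hk m hm
    rcases hpend k hk with h | h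
    · simp at h
    · exact h m hm
  | case2 vis u rest p ih =>
    intro hlen hqueue hmark hpend
    obtain ⟨u', hun, hu, hvu⟩ := hqueue u (by simp)
    subst hu
    obtain ⟨c1, c2, c3, c4, c5⟩ := bfsFold_main conn u'
      (PySem.List.pyRange 0 (conn.length : Int) 1) (vis, [])
      (pvRangeCast conn.length 0 le_rfl) hlen
    have hclose := bfsFold_closes conn u' vis hlen
    have hreachu : pvReach conn s u' := hmark u' hvu
    have hqueue' : ∀ i ∈ rest ++ (List.foldl (bfsStep conn ((u' : Nat) : Int)) (vis, []) (PySem.List.pyRange 0 (conn.length : Int) 1)).2, ∃ k : Nat, k < conn.length ∧ i = (k : Int) ∧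
        (List.foldl (bfsStep conn ((u' : Nat) : Int)) (vis, []) (PySem.List.pyRange 0 (conn.length : Int) 1)).1.getD k false = true := by
      intro i hi
      rcases List.mem_append.mp hi with h | h
      · obtain ⟨k, hk1, rfl, hk3⟩ := hqueue i (by simp [h])
        exact ⟨k, hk1, rfl, c2 k hk3⟩
      · rcases c4 i h with h' | ⟨m, rfl, hm1, hm2⟩
        · simp at h'
        · exact ⟨m, hm2.1, rfl, hm1⟩
    have hmark' : ∀ k, (List.foldl (bfsStep conn ((u' : Nat) : Int)) (vis, []) (PySem.List.pyRange 0 (conn.length : Int) 1)).1.getD k false = true → pvReach conn s k := by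
      intro k hk
      rcases c3 k hk with h | ⟨h1, _⟩
      · exact hmark k h
      · exact Relation.ReflTransGen.tail hreachu h1
    have hpend' : ∀ k, (List.foldl (bfsStep conn ((u' : Nat) : Int)) (vis, []) (PySem.List.pyRange 0 (conn.length : Int) 1)).1.getD k false = true → ((k : Int) ∈ rest ++ (List.foldl (bfsStep conn ((u' : Nat) : Int)) (vis, []) (PySem.List.pyRange 0 (conn.length : Int) 1)).2 ∨
        ∀ m, pvStep conn k m → (List.foldl (bfsStep conn ((u' : Nat) : Int)) (vis, []) (PySem.List.pyRange 0 (conn.length : Int) 1)).1.getD m false = true) := by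
      intro k hk
      rcases c3 k hk with h | ⟨_, h2⟩
      · rcases hpend k h with h' | h'
        · rcases List.mem_cons.mp h' with h'' | h''
          · obtain rfl : k = u' := by exact_mod_cast h''
            exact Or.inr (fun m hm => hclose m hm)
          · exact Or.inl (List.mem_append.mpr (Or.inl h''))
        · exact Or.inr (fun m hm => c2 m (h' m hm))
      · exact Or.inl (List.mem_append.mpr (Or.inr h2))
    obtain ⟨d1, d2, d3, d4⟩ := ih c1 hqueue' hmark' hpend'
    rw [bfsLoop_eq_cons conn vis (((u' : Nat) : Int)) rest]
    exact ⟨d1, fun k hk => d2 k (c2 k hk), d3, d4⟩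

theorem dfsA_norm (conn : List (List Int)) (vis : List Bool) (start : Int)
    (h : PySem.Raise.InRange conn.length start) (hlen : vis.length = conn.length) :
    dfsLoop conn vis [start] =
      dfsLoop conn vis [((pvWrap conn.length start : Nat) : Int)] := by
  have hw : pvWrap conn.length start < conn.length := pvWrap_lt h
  have hw' : pvWrap conn.length start < vis.length := by omega
  have hp1 : PySem.List.pop? [start] (-1) = some (start, ([] : List Int)) := by
    simpa using PySem.List.pop?_last ([] : List Int) start
  have hp2 : PySem.List.pop? [((pvWrap conn.length start : Nat) : Int)] (-1) =
      some (((pvWrap conn.length start : Nat) : Int), ([] : List Int)) := by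
    simpa using PySem.List.pop?_last ([] : List Int) ((pvWrap conn.length start : Nat) : Int)
  have hInV : PySem.Raise.InRange vis.length start := by rw [hlen]; exact h
  have hg1 : PySem.List.pyGet? vis start =
      some (vis.getD (pvWrap conn.length start) false) := by
    rw [pvGet_wrap vis start hInV, hlen, List.getElem?_eq_getElem hw']
    simp [List.getD_eq_getElem?_getD, List.getElem?_eq_getElem hw']
  have hg2 : PySem.List.pyGet? vis ((pvWrap conn.length start : Nat) : Int) =
      some (vis.getD (pvWrap conn.length start) false) := by
    rw [PySem.List.pyGet?_natCast, List.getElem?_eq_getElem hw']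
    simp [List.getD_eq_getElem?_getD, List.getElem?_eq_getElem hw']
  have e2 : PySem.List.pySetD vis start true =
      PySem.List.pySetD vis ((pvWrap conn.length start : Nat) : Int) true := by
    rw [pvSet_wrap vis start true hInV, PySem.List.pySetD_natCast, hlen]
  have e3 : PySem.List.pyGetD conn start [] =
      PySem.List.pyGetD conn ((pvWrap conn.length start : Nat) : Int) [] := by
    rw [pvGetD_wrap conn start [] h, PySem.List.pyGetD_natCast]
  have e4 : dfsPushes conn start = dfsPushes conn ((pvWrap conn.length start : Nat) : Int) := by
    funext v r
    unfold dfsPushes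
    rw [e3]
  cases hbv : vis.getD (pvWrap conn.length start) false with
  | true =>
    rw [dfsLoop_eq_true conn vis [start] start [] hp1 (hbv ▸ hg1)]
    rw [dfsLoop_eq_true conn vis [((pvWrap conn.length start : Nat) : Int)]
      ((pvWrap conn.length start : Nat) : Int) [] hp2 (hbv ▸ hg2)]
  | false =>
    rw [dfsLoop_eq_false conn vis [start] start [] hp1 (hbv ▸ hg1)]
    rw [dfsLoop_eq_false conn vis [((pvWrap conn.length start : Nat) : Int)]
      ((pvWrap conn.length start : Nat) : Int) [] hp2 (hbv ▸ hg2)]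
    simp only [e2, e4]

theorem dfsB_norm (conn : List (List Int)) (vis : List Bool) (start : Int)
    (h : PySem.Raise.InRange conn.length start) :
    bfsLoop conn vis [start] =
      bfsLoop conn vis [((pvWrap conn.length start : Nat) : Int)] := by
  have e3 : PySem.List.pyGetD conn start [] =
      PySem.List.pyGetD conn ((pvWrap conn.length start : Nat) : Int) [] := by
    rw [pvGetD_wrap conn start [] h, PySem.List.pyGetD_natCast]
  have estep : bfsStep conn start = bfsStep conn ((pvWrap conn.length start : Nat) : Int) := by
    funext p j
    unfold bfsStep
    rw [e3]
  rw [bfsLoop_eq_cons conn vis start [], bfsLoop_eq_cons conn vis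
    ((pvWrap conn.length start : Nat) : Int) [], estep]

theorem dfsA_char (conn : List (List Int)) (start : Int)
    (h : PySem.Raise.InRange conn.length start) :
    (dfs start conn).length = conn.length ∧
    (∀ k, (dfs start conn).getD k false = true ↔
      pvReach conn (pvWrap conn.length start) k) := by
  have hs : pvWrap conn.length start < conn.length := pvWrap_lt h
  unfold dfs
  rw [dfsA_norm conn _ start h (by simp)]
  obtain ⟨c1, c2, c3, c4, c5⟩ := dfsLoop_main conn (pvWrap conn.length start)
    (List.replicate conn.length false) [((pvWrap conn.length start : Nat) : Int)]
    (by simp)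
    (by intro i hi; simp at hi; exact ⟨pvWrap conn.length start, hs, hi⟩)
    (by
      intro k hk
      simp at hk
      obtain rfl : k = pvWrap conn.length start := by exact_mod_cast hk
      exact Relation.ReflTransGen.refl)
    (fun k hk => absurd hk (by simp [pvGetD_replicate]))
    (fun k hk => absurd hk (by simp [pvGetD_replicate]))
  refine ⟨c1, fun k => ⟨c3 k, ?_⟩⟩
  intro hr
  induction hr with
  | refl => exact c4 _ (by simp)
  | tail h1 h2 ih => exact c5 _ ih _ h2

theorem dfsB_char (conn : List (List Int)) (start : Int)
    (h : PySem.Raise.InRange conn.length start) :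
    (dfs_alt start conn).length = conn.length ∧
    (∀ k, (dfs_alt start conn).getD k false = true ↔
      pvReach conn (pvWrap conn.length start) k) := by
  have hs : pvWrap conn.length start < conn.length := pvWrap_lt h
  have hInR : PySem.Raise.InRange (List.replicate conn.length false).length start := by
    simpa using h
  have hE0 : dfs_alt start conn = bfsLoop conn
      ((List.replicate conn.length false).set (pvWrap conn.length start) true) [start] := by
    show bfsLoop conn
      (PySem.List.pySetD (List.replicate conn.length false) start true) [start] = _
    rw [pvSet_wrap _ _ _ hInR]
    simp
  rw [hE0, dfsB_norm conn _ start h]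
  have hsv : pvWrap conn.length start < (List.replicate conn.length false).length := by
    simpa using hs
  have hget0 : ∀ k, ((List.replicate conn.length false).set
      (pvWrap conn.length start) true).getD k false =
      if k = pvWrap conn.length start then true else false := by
    intro k
    rw [pvGetD_set _ _ _ hsv, pvGetD_replicate]
  obtain ⟨c1, c2, c3, c4⟩ := bfsLoop_main conn (pvWrap conn.length start)
    ((List.replicate conn.length false).set (pvWrap conn.length start) true)
    [((pvWrap conn.length start : Nat) : Int)]
    (by simp)
    (by
      intro i hi
      simp at hi
      exact ⟨pvWrap conn.length start, hs, hi, by rw [hget0]; simp⟩)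
    (by
      intro k hk
      rw [hget0] at hk
      by_cases hks : k = pvWrap conn.length start
      · subst hks; exact Relation.ReflTransGen.refl
      · rw [if_neg hks] at hk; cases hk)
    (by
      intro k hk
      rw [hget0] at hk
      by_cases hks : k = pvWrap conn.length start
      · subst hks; exact Or.inl (by simp)
      · rw [if_neg hks] at hk; cases hk)
  refine ⟨c1, fun k => ⟨c3 k, ?_⟩⟩
  intro hr
  induction hr with
  | refl => exact c2 _ (by rw [hget0]; simp)
  | tail h1 h2 ih => exact c4 _ ih _ h2

-- ===== VERDICT (by name: the statement is the Claim_ definition above) =====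
theorem dfs_spec : Claim_equal_dfs := by
  intro start conn _dom hpre
  unfold Spec_dfs
  obtain ⟨h1, _h2⟩ := hpre
  obtain ⟨la, ia⟩ := dfsA_char conn start h1
  obtain ⟨lb, ib⟩ := dfsB_char conn start h1
  apply List.ext_getElem (by omega)
  intro i hi1 hi2
  have ga : (dfs start conn).getD i false = (dfs start conn)[i] := by
    simp [List.getD_eq_getElem?_getD, List.getElem?_eq_getElem hi1]
  have gb : (dfs_alt start conn).getD i false = (dfs_alt start conn)[i] := by
    simp [List.getD_eq_getElem?_getD, List.getElem?_eq_getElem hi2]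
  exact Bool.coe_iff_coe.mp (by rw [← ga, ← gb]; exact (ia i).trans (ib i).symm)
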